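-- pv_equiv track=rewrite | github.com/arifkhan1990/Competitive-Programming | Codingninjas/Contest/Monthly Contest 20/XY Substring.py | xySubstring
-- ===== SOURCE A (Python) =====
-- def xySubstring(s: str) -> int:
--     n = len(s)
--     ans = 0
--
--     for i in range(n):
--         if s[i] == 'x' or s[i] == 'y':
--             ans += 1
--             for j in range(i+1,n):
--                 if s[j] == 'x' or s[j] == 'y':
--                     ans += 1
--                 else:
--                     break
--     return ans
-- ===== SOURCE B (Python) =====
-- def xySubstring(s: str) -> int:
--     # Single pass: track the length of the current run of x/y characters;
--     # each position extends all substrings ending there, so add the run length.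
--     ans = 0
--     run = 0
--     for c in s:
--         run = run + 1 if c == 'x' or c == 'y' else 0
--         ans += run
--     return ans
-- ===== Notes on version B (the rewrite author's own statement) =====
-- stated objective: simpler
-- what changed: Replaced the nested rescan-from-each-position loop by a single pass that maintains the current x/y run length and adds it to the answer at each character; measured only ~1.4x on random inputs, so no speed is claimed.
import Mathlib
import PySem

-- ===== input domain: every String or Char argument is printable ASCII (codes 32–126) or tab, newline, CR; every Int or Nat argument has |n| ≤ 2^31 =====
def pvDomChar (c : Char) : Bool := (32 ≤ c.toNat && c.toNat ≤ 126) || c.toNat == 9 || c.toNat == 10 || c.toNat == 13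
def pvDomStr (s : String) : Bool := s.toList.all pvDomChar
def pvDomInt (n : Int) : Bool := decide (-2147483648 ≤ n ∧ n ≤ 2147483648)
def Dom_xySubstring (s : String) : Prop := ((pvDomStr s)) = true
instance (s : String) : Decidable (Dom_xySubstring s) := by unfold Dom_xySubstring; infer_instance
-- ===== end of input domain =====

-- B replaces A's nested rescan from each position by a single pass keeping the
-- current x/y run length (objective: simpler; no speed claimed).

-- ===== PORT A =====
-- inner loop: for j in range(i+1, n): count while s[j] is 'x' or 'y', else break
def xyInner : List Char → Int
  | [] => 0
  | c :: t => if c = 'x' ∨ c = 'y' then 1 + xyInner t else 0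

-- outer loop over i in range(n): if s[i] in xy then ans += 1 plus the inner count
def xyOuter : List Char → Int
  | [] => 0
  | c :: t => (if c = 'x' ∨ c = 'y' then 1 + xyInner t else 0) + xyOuter t

def xySubstring (s : String) : Int := xyOuter s.toList

-- ===== PORT B =====
def xySubstring_alt (s : String) : Int :=
  (s.toList.foldl (fun (st : Int × Int) c =>
      let run : Int := if c = 'x' ∨ c = 'y' then st.2 + 1 else 0
      (st.1 + run, run)) (0, 0)).1

-- ===== PRECONDITION & SPEC =====
def Spec_xySubstring (s : String) (out : Int) : Prop := out = xySubstring_alt s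
instance (s : String) (out : Int) : Decidable (Spec_xySubstring s out) := by
  unfold Spec_xySubstring; infer_instance

-- ===== CLAIM =====
def Claim_equal_xySubstring : Prop :=
  ∀ (s : String), Dom_xySubstring s → Spec_xySubstring s (xySubstring s)

-- ===== LEMMAS AND PROOFS =====
-- abstract value of B's loop started with run length r
def xyG (r : Int) : List Char → Int
  | [] => 0
  | c :: t => if c = 'x' ∨ c = 'y' then (r + 1) + xyG (r + 1) t else xyG 0 t

lemma xy_foldl_eq (l : List Char) : ∀ (a r : Int),
    (l.foldl (fun (st : Int × Int) c =>
      let run : Int := if c = 'x' ∨ c = 'y' then st.2 + 1 else 0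
      (st.1 + run, run)) (a, r)).1 = a + xyG r l := by
  induction l with
  | nil => intro a r; simp [xyG]
  | cons c t ih =>
    intro a r
    by_cases h : c = 'x' ∨ c = 'y' <;>
      simp [List.foldl, h, xyG, ih] <;> ring

lemma xyG_eq (l : List Char) : ∀ (r : Int),
    xyG r l = xyOuter l + r * xyInner l := by
  induction l with
  | nil => intro r; simp [xyG, xyOuter, xyInner]
  | cons c t ih =>
    intro r
    by_cases h : c = 'x' ∨ c = 'y' <;>
      simp [xyG, xyOuter, xyInner, h, ih] <;> ring

-- ===== VERDICT =====
theorem xySubstring_spec : Claim_equal_xySubstring := by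
  intro s _
  unfold Spec_xySubstring xySubstring xySubstring_alt
  rw [xy_foldl_eq, xyG_eq]
  ring
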